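-- pv_equiv track=rewrite | github.com/dobbylee/Algorithms | 프로그래머스/1/42862. 체육복/체육복.py | solution
-- ===== SOURCE A (Python) =====
-- def solution(n, lost, reserve):
--     lost_set = set(lost)
--     reserve_set = set(reserve)
--     lost_set -= reserve_set
--     reserve_set -= set(lost)
--
--     for i in sorted(reserve_set):
--         if i - 1 in lost_set:
--             lost_set.remove(i - 1)
--         elif i + 1 in lost_set:
--             lost_set.remove(i + 1)
--
--     answer = n - len(lost_set)
--     return answer
-- ===== SOURCE B (Python) =====
-- def solution(n, lost, reserve):
--     # two-pointer sweep over the two sorted deduped lists instead of set removal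
--     L = sorted(set(lost) - set(reserve))
--     R = sorted(set(reserve) - set(lost))
--     i = j = 0
--     unmatched = 0
--     while i < len(L):
--         if j == len(R):
--             unmatched += 1
--             i += 1
--         elif L[i] == R[j] - 1 or L[i] == R[j] + 1:
--             i += 1
--             j += 1
--         elif L[i] < R[j] - 1:
--             unmatched += 1
--             i += 1
--         else:
--             j += 1
--     return n - unmatched
-- ===== Notes on version B (the rewrite author's own statement) =====
-- stated objective: alternative
-- what changed: Replaces A's loop over the sorted reserve set that mutates a lost set (membership test + remove per reserve student) with a two-pointer merge of the two sorted deduplicated lists that counts unmatched lost students directly, with no mutable set.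
import Mathlib
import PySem

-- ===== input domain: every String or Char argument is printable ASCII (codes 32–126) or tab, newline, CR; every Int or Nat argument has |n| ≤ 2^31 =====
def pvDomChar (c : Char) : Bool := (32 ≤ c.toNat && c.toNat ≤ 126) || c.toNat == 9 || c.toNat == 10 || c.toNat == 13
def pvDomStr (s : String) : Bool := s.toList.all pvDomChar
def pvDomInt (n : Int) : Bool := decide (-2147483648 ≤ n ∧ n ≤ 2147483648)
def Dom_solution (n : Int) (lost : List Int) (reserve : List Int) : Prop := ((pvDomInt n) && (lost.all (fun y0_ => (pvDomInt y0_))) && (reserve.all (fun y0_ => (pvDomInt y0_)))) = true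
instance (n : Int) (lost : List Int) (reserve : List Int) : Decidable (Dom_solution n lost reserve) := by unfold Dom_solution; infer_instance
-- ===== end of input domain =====

-- B replaces A's sorted-reserve loop over a mutable lost set by a two-pointer merge of the two
-- sorted deduped lists (alternative decomposition; same asymptotic cost).

-- ===== PORT A =====
-- lost_set.remove(x) is executed only under 'x in lost_set', where it equals discard.
def solution (n : Int) (lost : List Int) (reserve : List Int) : Int :=
  let lostSet0 := PySem.Set.ofList lost
  let reserveSet0 := PySem.Set.ofList reserve
  let lostSet := PySem.Set.diff lostSet0 reserveSet0
  let reserveSet := PySem.Set.diff reserveSet0 (PySem.Set.ofList lost)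
  let lostFinal := (PySem.List.sorted reserveSet (fun x => x)).foldl
    (fun ls i =>
      if PySem.Set.contains ls (i - 1) then PySem.Set.discard ls (i - 1)
      else if PySem.Set.contains ls (i + 1) then PySem.Set.discard ls (i + 1)
      else ls) lostSet
  n - PySem.Set.len lostFinal

-- ===== PORT B =====
-- two-pointer while loop of Source B: state (L-suffix, R-suffix), returns the number of unmatched lost students
def tp : List Int → List Int → Int
  | [], _ => 0
  | _ :: ls, [] => 1 + tp ls []
  | l :: ls, r :: rs =>
    if l == r - 1 || l == r + 1 then tp ls rs
    else if l < r - 1 then 1 + tp ls (r :: rs)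
    else tp (l :: ls) rs
termination_by L R => L.length + R.length

def solution_alt (n : Int) (lost : List Int) (reserve : List Int) : Int :=
  let L := PySem.List.sorted (PySem.Set.diff (PySem.Set.ofList lost) (PySem.Set.ofList reserve)) (fun x => x)
  let R := PySem.List.sorted (PySem.Set.diff (PySem.Set.ofList reserve) (PySem.Set.ofList lost)) (fun x => x)
  n - tp L R

-- ===== PRECONDITION & SPEC =====
def Spec_solution (n : Int) (lost : List Int) (reserve : List Int) (out : Int) : Prop := out = solution_alt n lost reserve
instance (n : Int) (lost : List Int) (reserve : List Int) (out : Int) : Decidable (Spec_solution n lost reserve out) := by unfold Spec_solution; infer_instance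

-- ===== CLAIM (what is proved, stated in full; the proofs are below) =====
def Claim_equal_solution : Prop := ∀ (n : Int) (lost : List Int) (reserve : List Int), Dom_solution n lost reserve → Spec_solution n lost reserve (solution n lost reserve)

-- ===== LEMMAS AND PROOFS =====

-- 'sorted(S)' with the identity key
def sid (S : List Int) : List Int := PySem.List.sorted S (fun x => x)

-- A's loop body, on the plain list level (Set.contains/discard are the list operations themselves)
def stepL (L : List Int) (r : Int) : List Int :=
  if L.contains (r - 1) then L.filter (fun y => !(y == r - 1))
  else if L.contains (r + 1) then L.filter (fun y => !(y == r + 1))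
  else L

lemma tp_nil (L : List Int) : tp L [] = (L.length : Int) := by
  induction L with
  | nil => simp [tp]
  | cons l ls ih => simp [tp, ih]; omega

lemma mem_sid (S : List Int) (x : Int) : x ∈ sid S ↔ x ∈ S :=
  (PySem.List.sorted_perm S (fun x => x) false).mem_iff

lemma pairwise_lt_sid (S : List Int) (h : S.Nodup) : (sid S).Pairwise (· < ·) := by
  have hle := PySem.List.sorted_pairwise S (fun x => x)
  have hnd : (sid S).Nodup := ((PySem.List.sorted_perm S (fun x => x) false).nodup_iff).mpr h
  exact (hle.and hnd).imp (fun hx => lt_of_le_of_ne hx.1 hx.2)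

lemma sid_filter (S : List Int) (p : Int → Bool) (h : S.Nodup) :
    sid (S.filter p) = (sid S).filter p := by
  apply PySem.List.sorted_eq_of_perm_of_pairwise_lt
  · exact ((PySem.List.sorted_perm S (fun x => x) false).filter p)
  · exact (pairwise_lt_sid S h).sublist List.filter_sublist

lemma nodup_stepL (S : List Int) (r : Int) (h : S.Nodup) : (stepL S r).Nodup := by
  unfold stepL; split_ifs <;> first | exact h.filter _ | exact h

lemma sid_stepL (S : List Int) (r : Int) (h : S.Nodup) : sid (stepL S r) = stepL (sid S) r := by
  have hc : ∀ x : Int, (sid S).contains x = S.contains x := by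
    intro x
    by_cases hx : x ∈ S
    · simp [hx, (mem_sid S x).mpr hx]
    · have hx2 : x ∉ sid S := fun h => hx ((mem_sid S x).mp h)
      simp [hx, hx2]
  unfold stepL
  rw [hc, hc]
  split_ifs with h1 h2
  · exact sid_filter S _ h
  · exact sid_filter S _ h
  · rfl

lemma sid_foldl (R S : List Int) (h : S.Nodup) :
    sid (R.foldl stepL S) = R.foldl stepL (sid S) := by
  induction R generalizing S with
  | nil => rfl
  | cons r rs ih =>
    simp only [List.foldl_cons]
    rw [ih (stepL S r) (nodup_stepL S r h), sid_stepL S r h]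

lemma filter_ne_eq_self (ls : List Int) (a : Int) (h : a ∉ ls) :
    ls.filter (fun y => !(y == a)) = ls := by
  apply List.filter_eq_self.mpr
  intro y hy
  simp only [Bool.not_eq_eq_eq_not, Bool.not_true, beq_eq_false_iff_ne]
  exact fun hya => h (hya ▸ hy)

-- lend-to-the-left step: if r-1 is the smallest unmatched lost ≤ r+1, both sides remove it
lemma tp_left (L : List Int) (r : Int) (rs : List Int)
    (hL : L.Pairwise (· < ·)) (hmem : (r - 1) ∈ L) (hrs : ∀ r' ∈ rs, r < r') :
    tp L (r :: rs) = tp (L.filter (fun y => !(y == r - 1))) rs := by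
  induction L with
  | nil => cases hmem
  | cons l ls ih =>
    have hlt := List.pairwise_cons.mp hL
    by_cases hl : l = r - 1
    · subst hl
      have hnot : (r - 1) ∉ ls := fun hx => lt_irrefl _ (hlt.1 _ hx)
      have hf : ((r - 1) :: ls).filter (fun y => !(y == r - 1)) = ls := by
        rw [List.filter_cons, filter_ne_eq_self ls (r - 1) hnot]; simp
      rw [hf, tp]; simp
    · have hmem' : (r - 1) ∈ ls := by cases hmem with
        | head => exact absurd rfl hl
        | tail _ hx => exact hx
      have hllt : l < r - 1 := hlt.1 _ hmem'
      have e1 : tp (l :: ls) (r :: rs) = 1 + tp ls (r :: rs) := by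
        rw [tp]
        rw [if_neg (by simp; omega), if_pos (by omega)]
      rw [List.filter_cons, if_pos (by simp; omega)]
      rw [e1, ih hlt.2 hmem']
      cases rs with
      | nil => rw [tp_nil, tp_nil]; simp only [List.length_cons]; push_cast; omega
      | cons r' rs' =>
        have : l < r' - 1 := by have := hrs r' (by simp); omega
        rw [tp]
        rw [if_neg (by simp; omega), if_pos (by omega)]

-- lend-to-the-right step
lemma tp_right (L : List Int) (r : Int) (rs : List Int)
    (hL : L.Pairwise (· < ·)) (hno : (r - 1) ∉ L) (hmem : (r + 1) ∈ L) (hnr : r ∉ L)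
    (hrs : ∀ r' ∈ rs, r < r') :
    tp L (r :: rs) = tp (L.filter (fun y => !(y == r + 1))) rs := by
  induction L with
  | nil => cases hmem
  | cons l ls ih =>
    have hlt := List.pairwise_cons.mp hL
    by_cases hl : l = r + 1
    · subst hl
      have hnot : (r + 1) ∉ ls := fun hx => lt_irrefl _ (hlt.1 _ hx)
      have hf : ((r + 1) :: ls).filter (fun y => !(y == r + 1)) = ls := by
        rw [List.filter_cons, filter_ne_eq_self ls (r + 1) hnot]; simp
      rw [hf, tp]; simp
    · have hmem' : (r + 1) ∈ ls := by cases hmem with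
        | head => exact absurd rfl hl
        | tail _ hx => exact hx
      have hl1 : l ≠ r - 1 := fun hx => hno (hx ▸ List.mem_cons_self)
      have hl2 : l ≠ r := fun hx => hnr (hx ▸ List.mem_cons_self)
      have hllt : l < r - 1 := by
        have : l < r + 1 := hlt.1 _ hmem'
        omega
      have e1 : tp (l :: ls) (r :: rs) = 1 + tp ls (r :: rs) := by
        rw [tp, if_neg (by simp; omega), if_pos (by omega)]
      rw [List.filter_cons, if_pos (by simp; omega)]
      rw [e1, ih hlt.2 (fun hx => hno (List.mem_cons_of_mem _ hx)) hmem'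
            (fun hx => hnr (List.mem_cons_of_mem _ hx))]
      cases rs with
      | nil => rw [tp_nil, tp_nil]; simp only [List.length_cons]; push_cast; omega
      | cons r' rs' =>
        have : l < r' - 1 := by have := hrs r' (by simp); omega
        rw [tp, if_neg (by simp; omega), if_pos (by omega)]

-- a reserve student with no adjacent lost student changes nothing
lemma tp_skip (L : List Int) (r : Int) (rs : List Int)
    (hL : L.Pairwise (· < ·)) (h1 : (r - 1) ∉ L) (h2 : (r + 1) ∉ L) (h0 : r ∉ L)
    (hrs : ∀ r' ∈ rs, r < r') :
    tp L (r :: rs) = tp L rs := by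
  induction L with
  | nil => cases rs <;> simp [tp]
  | cons l ls ih =>
    have hlt := List.pairwise_cons.mp hL
    have hl1 : l ≠ r - 1 := fun hx => h1 (hx ▸ List.mem_cons_self)
    have hl2 : l ≠ r + 1 := fun hx => h2 (hx ▸ List.mem_cons_self)
    have hl0 : l ≠ r := fun hx => h0 (hx ▸ List.mem_cons_self)
    by_cases hllt : l < r - 1
    · have e1 : tp (l :: ls) (r :: rs) = 1 + tp ls (r :: rs) := by
        rw [tp, if_neg (by simp; omega), if_pos (by omega)]
      rw [e1, ih hlt.2 (fun hx => h1 (List.mem_cons_of_mem _ hx))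
            (fun hx => h2 (List.mem_cons_of_mem _ hx)) (fun hx => h0 (List.mem_cons_of_mem _ hx))]
      cases rs with
      | nil => rw [tp_nil, tp_nil]; simp only [List.length_cons]; push_cast; omega
      | cons r' rs' =>
        have : l < r' - 1 := by have := hrs r' (by simp); omega
        rw [tp, if_neg (by simp; omega), if_pos (by omega)]
    · rw [tp, if_neg (by simp; omega), if_neg (by omega)]

-- main invariant: A's removal loop leaves exactly tp L R unmatched lost students
lemma fold_tp (R : List Int) : ∀ (L : List Int), L.Pairwise (· < ·) →
    R.Pairwise (· < ·) → (∀ r' ∈ R, r' ∉ L) →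
    ((R.foldl stepL L).length : Int) = tp L R := by
  induction R with
  | nil => intro L _ _ _; rw [tp_nil]; rfl
  | cons r rs ih =>
    intro L hL hR hdisj
    have hRlt := List.pairwise_cons.mp hR
    have hrL : r ∉ L := hdisj r List.mem_cons_self
    simp only [List.foldl_cons]
    have hdisj' : ∀ r' ∈ rs, r' ∉ stepL L r := by
      intro r' hr' hx
      have : r' ∈ L := by
        unfold stepL at hx; split_ifs at hx <;>
          first | exact List.mem_of_mem_filter hx | exact hx
      exact hdisj r' (List.mem_cons_of_mem _ hr') this
    have hL' : (stepL L r).Pairwise (· < ·) := by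
      unfold stepL; split_ifs <;> first | exact hL.sublist List.filter_sublist | exact hL
    rw [ih (stepL L r) hL' hRlt.2 hdisj']
    unfold stepL
    by_cases hm1 : (r - 1) ∈ L
    · rw [if_pos (List.contains_iff_mem.mpr hm1)]
      exact (tp_left L r rs hL hm1 hRlt.1).symm
    · rw [if_neg (by simpa [List.contains_iff_mem] using hm1)]
      by_cases hm2 : (r + 1) ∈ L
      · rw [if_pos (List.contains_iff_mem.mpr hm2)]
        exact (tp_right L r rs hL hm1 hm2 hrL hRlt.1).symm
      · rw [if_neg (by simpa [List.contains_iff_mem] using hm2)]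
        exact (tp_skip L r rs hL hm1 hm2 hrL hRlt.1).symm

-- ===== VERDICT (by name: the statement is the Claim_ definition above) =====
theorem solution_spec : Claim_equal_solution := by
  intro n lost reserve _
  unfold Spec_solution solution solution_alt
  show n - PySem.Set.len ((sid (PySem.Set.diff (PySem.Set.ofList reserve) (PySem.Set.ofList lost))).foldl stepL
        (PySem.Set.diff (PySem.Set.ofList lost) (PySem.Set.ofList reserve)))
      = n - tp (sid (PySem.Set.diff (PySem.Set.ofList lost) (PySem.Set.ofList reserve)))
              (sid (PySem.Set.diff (PySem.Set.ofList reserve) (PySem.Set.ofList lost)))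
  have hLnd : (PySem.Set.diff (PySem.Set.ofList lost) (PySem.Set.ofList reserve)).Nodup :=
    (PySem.Set.nodup_ofList lost).filter _
  have hRnd : (PySem.Set.diff (PySem.Set.ofList reserve) (PySem.Set.ofList lost)).Nodup :=
    (PySem.Set.nodup_ofList reserve).filter _
  have hdisj : ∀ r' ∈ sid (PySem.Set.diff (PySem.Set.ofList reserve) (PySem.Set.ofList lost)),
      r' ∉ sid (PySem.Set.diff (PySem.Set.ofList lost) (PySem.Set.ofList reserve)) := by
    intro r' hr' hx
    have hr'2 := (mem_sid _ _).mp hr'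
    have hx2 := (mem_sid _ _).mp hx
    simp only [PySem.Set.diff, List.mem_filter, Bool.not_eq_eq_eq_not, Bool.not_true] at hr'2 hx2
    have hnm : r' ∉ PySem.Set.ofList lost := by
      simpa [List.contains_iff_mem] using hr'2.2
    exact hnm hx2.1
  have h1 : ((sid (PySem.Set.diff (PySem.Set.ofList reserve) (PySem.Set.ofList lost))).foldl stepL
      (PySem.Set.diff (PySem.Set.ofList lost) (PySem.Set.ofList reserve))).length
      = ((sid (PySem.Set.diff (PySem.Set.ofList reserve) (PySem.Set.ofList lost))).foldl stepL
      (sid (PySem.Set.diff (PySem.Set.ofList lost) (PySem.Set.ofList reserve)))).length := by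
    rw [← sid_foldl _ _ hLnd]
    exact ((PySem.List.sorted_perm _ _ _).length_eq).symm
  have h2 := fold_tp (sid (PySem.Set.diff (PySem.Set.ofList reserve) (PySem.Set.ofList lost)))
    (sid (PySem.Set.diff (PySem.Set.ofList lost) (PySem.Set.ofList reserve)))
    (pairwise_lt_sid _ hLnd) (pairwise_lt_sid _ hRnd) hdisj
  unfold PySem.Set.len
  rw [h1, h2]
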